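-- pv_equiv track=rewrite | github.com/Jakelanghel/coding-challenges | python/finished/break_camelCase/rec_to_sq/main.py | sqInRect
-- ===== SOURCE A (Python) =====
-- def sqInRect(length, width):
--     # If the dimensions are the same, it's already a square, so return None
--     if length == width:
--         return None
--
--     squares = []
--
--     # Continue cutting squares until one of the dimensions becomes zero
--     while length > 0 and width > 0:
--         if length > width:
--             # Add the largest square possible and update length
--             squares.append(width)
--             length -= width
--         else:
--             # Add the largest square possible and update width
--             squares.append(length)
--             width -= length
--
--     return squares
-- ===== SOURCE B (Python) =====
-- def sqInRect(length, width):
--     # Euclidean variant: emit all equal squares of one size at once via divmod.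
--     if length == width:
--         return None
--     squares = []
--     while length > 0 and width > 0:
--         m = min(length, width)
--         q, r = divmod(max(length, width), m)
--         squares += [m] * q
--         length, width = m, r
--     return squares
-- ===== Notes on version B (the rewrite author's own statement) =====
-- stated objective: faster
-- what changed: Replaces the one-square-per-iteration subtraction loop with a Euclidean quotient/remainder loop that emits each batch of equal squares with a single divmod.
import Mathlib
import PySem

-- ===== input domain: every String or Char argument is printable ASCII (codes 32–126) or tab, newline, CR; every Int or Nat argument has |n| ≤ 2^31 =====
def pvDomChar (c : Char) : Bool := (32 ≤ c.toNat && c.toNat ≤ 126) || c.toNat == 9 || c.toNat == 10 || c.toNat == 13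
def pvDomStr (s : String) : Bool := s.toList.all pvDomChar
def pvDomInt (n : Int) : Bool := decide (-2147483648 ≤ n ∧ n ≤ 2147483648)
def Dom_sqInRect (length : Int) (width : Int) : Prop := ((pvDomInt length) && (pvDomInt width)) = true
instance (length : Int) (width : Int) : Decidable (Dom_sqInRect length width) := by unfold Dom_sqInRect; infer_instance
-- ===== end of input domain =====

-- B replaces A's one-square-per-iteration subtraction loop by a Euclidean quotient/remainder
-- loop (objective: faster — logarithmically many iterations instead of linearly many).

-- ===== PORT A =====
-- while length > 0 and width > 0: append min side, subtract it from the larger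
def sqLoopA (length : Int) (width : Int) (squares : List Int) : List Int :=
  if _h : length > 0 ∧ width > 0 then
    if length > width then
      sqLoopA (length - width) width (squares ++ [width])
    else
      sqLoopA length (width - length) (squares ++ [length])
  else squares
termination_by (length + width).toNat
decreasing_by all_goals omega

def sqInRect (length : Int) (width : Int) : Option (List Int) :=
  if length = width then none
  else some (sqLoopA length width [])

-- ===== PORT B =====
-- while length > 0 and width > 0: m = min; q, r = divmod(max, m); squares += [m]*q; length, width = m, r
def sqLoopB (length : Int) (width : Int) (squares : List Int) : List Int :=
  if _h : length > 0 ∧ width > 0 then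
    let m := min length width
    let q := PySem.Int.floordiv (max length width) m
    let r := PySem.Int.mod (max length width) m
    sqLoopB m r (squares ++ List.replicate q.toNat m)
  else squares
termination_by (length + width).toNat
decreasing_by
  have _h1 := PySem.Int.mod_nonneg (a := max length width) (b := min length width) (by omega)
  have h2 := PySem.Int.mod_lt (a := max length width) (b := min length width) (by omega)
  omega

def sqInRect_alt (length : Int) (width : Int) : Option (List Int) :=
  if length = width then none
  else some (sqLoopB length width [])

-- ===== PRECONDITION & SPEC =====
def Spec_sqInRect (length : Int) (width : Int) (out : Option (List Int)) : Prop := out = sqInRect_alt length width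
instance (length : Int) (width : Int) (out : Option (List Int)) : Decidable (Spec_sqInRect length width out) := by unfold Spec_sqInRect; infer_instance

-- ===== CLAIM (what is proved, stated in full; the proofs are below) =====
def Claim_equal_sqInRect : Prop := ∀ (length : Int) (width : Int), Dom_sqInRect length width → Spec_sqInRect length width (sqInRect length width)

-- ===== LEMMAS AND PROOFS =====

theorem sqLoopB_comm (l w : Int) (s : List Int) : sqLoopB l w s = sqLoopB w l s := by
  conv_lhs => rw [sqLoopB]
  conv_rhs => rw [sqLoopB]
  simp only [min_comm w l, max_comm w l, and_comm]

-- B absorbs one subtraction step of A (0 < a ≤ b)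
theorem sqLoopB_absorb (a b : Int) (s : List Int) (ha : 0 < a) (hab : a ≤ b) :
    sqLoopB a b s = sqLoopB a (b - a) (s ++ [a]) := by
  have hmin : min a b = a := min_eq_left hab
  have hmax : max a b = b := max_eq_right hab
  have hsum := PySem.Int.floordiv_mul_add_mod b a
  by_cases h2 : b < 2 * a
  · -- one square of this size: q = 1, r = b - a
    have hq : PySem.Int.floordiv b a = 1 := by
      rw [PySem.Int.floordiv_eq_iff_of_pos ha]; constructor <;> omega
    have hr : PySem.Int.mod b a = b - a := by
      have h := hsum; rw [hq, one_mul] at h; omega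
    rw [sqLoopB]
    simp only [dif_pos (show a > 0 ∧ b > 0 by omega), hmin, hmax, hq, hr]
    rfl
  · -- q ≥ 2: peel one copy of a off the replicate batch
    have hq2 : (2 : Int) ≤ PySem.Int.floordiv b a := by
      rw [PySem.Int.le_floordiv_iff_mul_le ha]; omega
    have hfd : PySem.Int.floordiv b a = PySem.Int.floordiv (b - a) a + 1 := by
      have h' := PySem.Int.floordiv_mul_add_mod (b - a) a
      have hm1 := PySem.Int.mod_nonneg (a := b) (b := a) ha
      have hm2 := PySem.Int.mod_lt (a := b) (b := a) ha
      have hm1' := PySem.Int.mod_nonneg (a := b - a) (b := a) ha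
      have hm2' := PySem.Int.mod_lt (a := b - a) (b := a) ha
      nlinarith [PySem.Int.floordiv_mul_add_mod b a]
    have hmd : PySem.Int.mod b a = PySem.Int.mod (b - a) a := by
      have h' := PySem.Int.floordiv_mul_add_mod (b - a) a
      nlinarith
    have hminr : min a (b - a) = a := min_eq_left (by omega)
    have hmaxr : max a (b - a) = b - a := max_eq_right (by omega)
    rw [sqLoopB]
    conv_rhs => rw [sqLoopB]
    simp only [dif_pos (show a > 0 ∧ b > 0 by omega),
      dif_pos (show a > 0 ∧ b - a > 0 by omega), hmin, hmax, hminr, hmaxr, hmd]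
    congr 1
    rw [hfd]
    have : (PySem.Int.floordiv (b - a) a + 1).toNat
        = (PySem.Int.floordiv (b - a) a).toNat + 1 := by omega
    rw [this, List.replicate_succ, List.append_assoc]
    rfl

theorem sqLoop_eq (n : Nat) (l w : Int) (s : List Int) (hn : (l + w).toNat ≤ n) :
    sqLoopA l w s = sqLoopB l w s := by
  induction n generalizing l w s with
  | zero =>
      rw [sqLoopA, sqLoopB]
      have : ¬ (l > 0 ∧ w > 0) := by omega
      simp [this]
  | succ n ih =>
      rw [sqLoopA]
      split
      · next h =>
        split
        · next hlw =>
          rw [ih _ _ _ (by omega), sqLoopB_comm, ← sqLoopB_absorb w l s h.2 (by omega),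
            sqLoopB_comm]
        · next hlw =>
          rw [ih _ _ _ (by omega), ← sqLoopB_absorb l w s h.1 (by omega)]
      · next h =>
        rw [sqLoopB]
        simp [h]

-- ===== VERDICT (by name: the statement is the Claim_ definition above) =====
theorem sqInRect_spec : Claim_equal_sqInRect := by
  intro l w _
  unfold Spec_sqInRect sqInRect sqInRect_alt
  split
  · rfl
  · rw [sqLoop_eq (l + w).toNat l w [] le_rfl]
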